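-- pv_equiv track=rewrite | github.com/stuart295/AdventOfCode | 2022/day_19/solve2.py | calc_max_ore_bots
-- ===== SOURCE A (Python) =====
-- def calc_max_ore_bots(cost, time):
--     bots = 1
--     ore = 0
--     for t in range(time):
--         ore += bots
--         while ore >= cost:
--             bots += 1
--             ore -= cost
--     return bots
-- ===== SOURCE B (Python) =====
-- def calc_max_ore_bots(cost, time):
--     # Event-driven: jump straight to the next tick on which a bot can be built,
--     # instead of simulating every tick.
--     bots, ore, consumed = 1, 0, 0
--     while True:
--         k = -(-(cost - ore) // bots)  # idle ticks until ore reaches cost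
--         if consumed + k > time:
--             return bots
--         consumed += k
--         ore += k * bots
--         bots += ore // cost
--         ore %= cost
-- ===== Notes on version B (the rewrite author's own statement) =====
-- stated objective: faster
-- what changed: Replaces the per-tick simulation by an event-driven loop that ceil-divides to jump over all idle ticks until the next build and folds all same-tick builds into one ore//cost update.
-- outside the precondition, e.g. on calc_max_ore_bots(0, 0): A returns 1, B raises ZeroDivisionError; on calc_max_ore_bots(-3, 0): A returns 1, B does not finish within the time limit
import Mathlib
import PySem

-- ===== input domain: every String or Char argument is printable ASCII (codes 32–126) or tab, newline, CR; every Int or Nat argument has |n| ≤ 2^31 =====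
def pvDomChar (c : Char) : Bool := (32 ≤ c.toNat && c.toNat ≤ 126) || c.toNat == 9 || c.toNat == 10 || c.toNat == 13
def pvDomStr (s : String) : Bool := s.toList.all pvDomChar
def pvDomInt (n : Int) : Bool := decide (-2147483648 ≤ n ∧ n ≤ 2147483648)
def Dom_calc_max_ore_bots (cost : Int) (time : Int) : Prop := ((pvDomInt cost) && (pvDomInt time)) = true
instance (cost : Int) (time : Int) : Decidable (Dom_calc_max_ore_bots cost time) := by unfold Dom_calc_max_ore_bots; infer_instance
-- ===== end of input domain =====

-- B replaces A's per-tick simulation by an event-driven loop that ceil-divides to jump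
-- over the idle ticks before each build and folds the same-tick builds into one ore//cost
-- update (objective: faster — A's inner while does one iteration per bot built).

-- ===== PORT A =====
-- inner 'while ore >= cost: bots += 1; ore -= cost' (fuel: with cost ≥ 1 the loop runs at
-- most ore times, so ore.toNat + 1 fuel is enough; fuel only makes the port total)
def pvInnerA (cost : Int) : Nat → Int × Int → Int × Int
  | 0, s => s
  | n + 1, (bots, ore) =>
      if ore ≥ cost then pvInnerA cost n (bots + 1, ore - cost) else (bots, ore)

-- 'for t in range(time)': the body does not read t, so we recurse on the tick count
def pvLoopA (cost : Int) : Nat → Int × Int → Int × Int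
  | 0, s => s
  | n + 1, (bots, ore) =>
      let ore1 := ore + bots
      pvLoopA cost n (pvInnerA cost (ore1.toNat + 1) (bots, ore1))

def calc_max_ore_bots (cost : Int) (time : Int) : Int :=
  (pvLoopA cost time.toNat (1, 0)).1

-- ===== PORT B =====
-- event loop: k idle ticks until a build is affordable; stops when the next build would
-- land beyond 'time' (fuel: consumed grows by k ≥ 1 per event under Pre_, so time.toNat + 1 is enough)
def pvLoopB (cost : Int) (time : Int) : Nat → Int × Int × Int → Int
  | 0, (bots, _, _) => bots
  | n + 1, (bots, ore, consumed) =>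
      let k := -(PySem.Int.floordiv (-(cost - ore)) bots)
      if consumed + k > time then bots
      else
        let ore' := ore + k * bots
        pvLoopB cost time n
          (bots + PySem.Int.floordiv ore' cost, PySem.Int.mod ore' cost, consumed + k)

def calc_max_ore_bots_alt (cost : Int) (time : Int) : Int :=
  pvLoopB cost time (time.toNat + 1) (1, 0, 0)

-- ===== PRECONDITION & SPEC =====
-- Pre_ excludes the nonpositive-cost inputs on which A's inner while would never terminate
-- once a tick runs (A returns only in the degenerate time ≤ 0 case, without consulting cost),
-- and on which B's event loop divides by cost and raises or diverges; the degenerate corner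
-- time < cost ∧ time ≤ 0, where both return 1 at once, stays inside.
def Pre_calc_max_ore_bots (cost : Int) (time : Int) : Prop := 1 ≤ cost ∨ (time < cost ∧ time ≤ 0)
instance (cost : Int) (time : Int) : Decidable (Pre_calc_max_ore_bots cost time) := by
  unfold Pre_calc_max_ore_bots; infer_instance

def pvWitness_calc_max_ore_bots : Int × Int := (3, 10)

def Spec_calc_max_ore_bots (cost : Int) (time : Int) (out : Int) : Prop := out = calc_max_ore_bots_alt cost time
instance (cost : Int) (time : Int) (out : Int) : Decidable (Spec_calc_max_ore_bots cost time out) := by unfold Spec_calc_max_ore_bots; infer_instance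

-- ===== CLAIM (what is proved, stated in full; the proofs are below) =====
def Claim_equal_calc_max_ore_bots : Prop := ∀ (cost : Int) (time : Int), Dom_calc_max_ore_bots cost time → Pre_calc_max_ore_bots cost time → Spec_calc_max_ore_bots cost time (calc_max_ore_bots cost time)

-- ===== LEMMAS AND PROOFS =====

-- normalized one-tick step: add bots ore, then build ore/cost bots keeping ore % cost
def pvTick (cost : Int) (s : Int × Int) : Int × Int :=
  (s.1 + (s.2 + s.1) / cost, (s.2 + s.1) % cost)

def pvTickIter (cost : Int) : Nat → Int × Int → Int × Int
  | 0, s => s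
  | n + 1, s => pvTickIter cost n (pvTick cost s)


-- one tick of A in closed form: the inner while with enough fuel builds ore/cost bots
theorem pvInnerA_spec (cost : Int) : ∀ (f : Nat) (bots ore : Int), 1 ≤ cost → 0 ≤ ore →
    ore / cost < (f : Int) → pvInnerA cost f (bots, ore) = (bots + ore / cost, ore % cost) := by
  intro f
  induction f with
  | zero =>
    intro bots ore hc ho hf
    exact absurd hf (not_lt.mpr (by exact_mod_cast Int.ediv_nonneg ho (by omega)))
  | succ n ih =>
    intro bots ore hc ho hf
    by_cases h : ore ≥ cost
    · have hsub : ore - cost = ore + (-1) * cost := by ring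
      have hdiv : (ore - cost) / cost = ore / cost + (-1) := by
        rw [hsub, Int.add_mul_ediv_right _ _ (by omega : cost ≠ 0)]
      have hmod : (ore - cost) % cost = ore % cost := by
        rw [hsub, Int.add_mul_emod_self_right]
      simp only [pvInnerA, if_pos h]
      rw [ih (bots + 1) (ore - cost) hc (by omega)
        (by rw [hdiv]; push_cast at hf ⊢; linarith), hdiv, hmod]
      simp only [Prod.mk.injEq, and_true]
      ring
    · have hlt : ore < cost := by omega
      simp only [pvInnerA, if_neg h]
      rw [Int.ediv_eq_zero_of_lt ho hlt, Int.emod_eq_of_lt ho hlt]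
      simp

-- A's loop is the iterated normalized tick
theorem pvLoopA_eq_tickIter (cost : Int) : ∀ (n : Nat) (bots ore : Int), 1 ≤ cost →
    0 ≤ ore → 0 ≤ bots →
    pvLoopA cost n (bots, ore) = pvTickIter cost n (bots, ore) := by
  intro n
  induction n with
  | zero => intro bots ore _ _ _; rfl
  | succ m ih =>
    intro bots ore hc ho hb
    have ho1 : 0 ≤ ore + bots := by omega
    have htn : ((ore + bots).toNat : Int) = ore + bots := Int.toNat_of_nonneg ho1
    have hfuel : (ore + bots) / cost < (((ore + bots).toNat + 1 : Nat) : Int) := by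
      have h1 : (ore + bots) / cost ≤ ore + bots := Int.ediv_le_self _ ho1
      push_cast
      linarith
    simp only [pvLoopA]
    rw [pvInnerA_spec cost _ _ _ hc ho1 hfuel,
      ih _ _ hc (Int.emod_nonneg _ (by omega))
        (by have := Int.ediv_nonneg ho1 (by omega : (0:Int) ≤ cost); linarith)]
    simp [pvTickIter, pvTick]

-- ticks on which no bot can be built just accumulate ore
theorem pvTickIter_noBuild (cost : Int) : ∀ (m : Nat) (bots ore : Int), 1 ≤ cost →
    0 ≤ ore → 0 ≤ bots → ore + (m : Int) * bots < cost →
    pvTickIter cost m (bots, ore) = (bots, ore + (m : Int) * bots) := by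
  intro m
  induction m with
  | zero => intro bots ore _ _ _ _; simp [pvTickIter]
  | succ n ih =>
    intro bots ore hc ho hb hlt
    have hmb : 0 ≤ (n : Int) * bots := by positivity
    have hlt1 : ore + (n : Int) * bots + bots < cost := by push_cast at hlt; linarith
    have h1 : ore + bots < cost := by linarith
    simp only [pvTickIter, pvTick]
    rw [Int.ediv_eq_zero_of_lt (by omega) h1, Int.emod_eq_of_lt (by omega) h1]
    rw [add_zero, ih bots (ore + bots) hc (by omega) hb (by linarith)]
    simp only [Prod.mk.injEq, true_and]
    push_cast
    ring

theorem pvTickIter_add (cost : Int) (a b : Nat) : ∀ (s : Int × Int),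
    pvTickIter cost (a + b) s = pvTickIter cost b (pvTickIter cost a s) := by
  induction a with
  | zero => intro s; simp [pvTickIter]
  | succ n ih => intro s; simp only [pvTickIter, Nat.succ_add]; exact ih _

-- B's event loop computes the first component of the iterated tick
theorem pvLoopB_spec (cost time : Int) : ∀ (f : Nat) (bots ore consumed : Int),
    1 ≤ cost → 1 ≤ bots → 0 ≤ ore → ore < cost →
    (time - consumed).toNat < f →
    pvLoopB cost time f (bots, ore, consumed) =
      (pvTickIter cost (time - consumed).toNat (bots, ore)).1 := by
  intro f
  induction f with
  | zero => intro bots ore consumed _ _ _ _ hf; omega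
  | succ n ih =>
    intro bots ore consumed hc hb ho hoc hf
    have hb0 : (0:Int) < bots := by omega
    have hfd : PySem.Int.floordiv (-(cost - ore)) bots = (ore - cost) / bots := by
      rw [show -(cost - ore) = ore - cost by ring, PySem.Int.floordiv_eq_ediv_of_pos hb0]
    simp only [pvLoopB, hfd]
    set q : Int := (ore - cost) / bots with hqdef
    set r : Int := (ore - cost) % bots with hrdef
    have hqr : bots * q + r = ore - cost := Int.mul_ediv_add_emod _ _
    have hr0 : 0 ≤ r := Int.emod_nonneg _ (by omega)
    have hrb : r < bots := Int.emod_lt_of_pos _ hb0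
    set X : Int := bots * q with hXdef
    have hXle : X ≤ -1 := by omega
    have hq1 : q ≤ -1 := by
      by_contra hcon
      push Not at hcon
      have h0 : 0 ≤ bots * q := mul_nonneg (le_of_lt hb0) (by omega)
      rw [← hXdef] at h0
      omega
    have hkb : -q * bots = -X := by rw [hXdef]; ring
    have hkb1 : (-q - 1) * bots = -X - bots := by rw [hXdef]; ring
    by_cases hstop : consumed + -q > time
    · rw [if_pos hstop]
      by_cases hz : time ≤ consumed
      · rw [show (time - consumed).toNat = 0 by omega]
        rfl
      · have hmc : ((time - consumed).toNat : Int) = time - consumed := by omega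
        have hmk : ((time - consumed).toNat : Int) ≤ -q - 1 := by omega
        have hmul : ((time - consumed).toNat : Int) * bots ≤ (-q - 1) * bots :=
          mul_le_mul_of_nonneg_right hmk (le_of_lt hb0)
        have hnb : ore + ((time - consumed).toNat : Int) * bots < cost := by
          rw [hkb1] at hmul; omega
        rw [pvTickIter_noBuild cost _ bots ore hc ho (by omega) hnb]
    · rw [if_neg hstop]
      push Not at hstop
      have hko : ore + -q * bots = cost + r := by rw [hkb]; omega
      have hofd : PySem.Int.floordiv (ore + -q * bots) cost = (ore + -q * bots) / cost :=
        PySem.Int.floordiv_eq_ediv_of_pos (by omega)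
      have homd : PySem.Int.mod (ore + -q * bots) cost = (ore + -q * bots) % cost :=
        PySem.Int.mod_eq_emod_of_pos (by omega)
      have hore' : 0 ≤ ore + -q * bots := by omega
      have hbd : 0 ≤ (ore + -q * bots) / cost := Int.ediv_nonneg hore' (by omega)
      have hmo0 : 0 ≤ (ore + -q * bots) % cost := Int.emod_nonneg _ (by omega)
      have hmoc : (ore + -q * bots) % cost < cost := Int.emod_lt_of_pos _ (by omega)
      -- split the tick iteration: (k-1) idle ticks, one build tick, then the rest
      have hsplit : (time - consumed).toNat =
          ((-q - 1).toNat + 1) + (time - (consumed + -q)).toNat := by omega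
      rw [hsplit, pvTickIter_add, pvTickIter_add]
      have hcast : (((-q - 1).toNat : Nat) : Int) = -q - 1 := by omega
      have hnb : ore + (((-q - 1).toNat : Nat) : Int) * bots < cost := by
        rw [hcast, hkb1]; omega
      rw [pvTickIter_noBuild cost _ bots ore hc ho (by omega) hnb]
      have hone : ore + (((-q - 1).toNat : Nat) : Int) * bots + bots = ore + -q * bots := by
        rw [hcast]; ring
      have htick : pvTickIter cost 1 (bots, ore + (((-q - 1).toNat : Nat) : Int) * bots) =
          (bots + (ore + -q * bots) / cost, (ore + -q * bots) % cost) := by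
        simp only [pvTickIter, pvTick]
        rw [show ore + (((-q - 1).toNat : Nat) : Int) * bots + bots = ore + -q * bots from hone]
      rw [htick, hofd, homd, ih _ _ _ hc (by omega) hmo0 hmoc (by omega)]

-- ===== VERDICT (by name: the statement is the Claim_ definition above) =====
theorem calc_max_ore_bots_spec : Claim_equal_calc_max_ore_bots := by
  intro cost time _ hpre
  unfold Spec_calc_max_ore_bots calc_max_ore_bots calc_max_ore_bots_alt
  by_cases hc : (1:Int) ≤ cost
  · rw [pvLoopA_eq_tickIter cost time.toNat 1 0 hc le_rfl (by omega),
      pvLoopB_spec cost time (time.toNat + 1) 1 0 0 hc le_rfl le_rfl (by omega) (by omega),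
      sub_zero]
  · have hco : time < cost ∧ time ≤ 0 := hpre.resolve_left hc
    rw [show time.toNat = 0 from by omega]
    have hk : -(PySem.Int.floordiv (-(cost - 0)) 1) = cost := by
      rw [PySem.Int.floordiv_eq_ediv_of_pos one_pos, Int.ediv_one]; ring
    simp only [pvLoopB, hk]
    rw [if_pos (by omega : (0:Int) + cost > time)]
    rfl
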